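-- pv_equiv track=rewrite | github.com/jwun95/algorithm | 프로그래머스/2/42626. 더 맵게/더 맵게.py | solution
-- ===== SOURCE A (Python) =====
-- import heapq
--
-- def solution(scoville, K):
--     heap = scoville
--     heapq.heapify(heap)
--     answer = 0
--
--     while heap:
--         if len(heap) == 1 and heap[0] < K:
--             return -1
--         min_value = heapq.heappop(heap)
--         if min_value >= K:
--             break
--
--         min_value2 = heapq.heappop(heap)
--         value = min_value + (min_value2 * 2)
--         heapq.heappush(heap, value)
--         answer += 1
--
--     return answer
-- ===== SOURCE B (Python) =====
-- def _ins_sorted(v, lst):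
--     # return a new list: v inserted into sorted lst, after any equal values
--     out = []
--     k = 0
--     while k < len(lst) and lst[k] <= v:
--         out.append(lst[k])
--         k += 1
--     out.append(v)
--     out.extend(lst[k:])
--     return out
--
--
-- def solution(scoville, K):
--     pool = sorted(scoville)
--     answer = 0
--     while pool:
--         if pool[0] >= K:
--             return answer
--         if len(pool) == 1:
--             return -1
--         v = pool[0] + 2 * pool[1]
--         pool = _ins_sorted(v, pool[2:])
--         answer += 1
--     return answer
-- ===== Notes on version B (the rewrite author's own statement) =====
-- stated objective: simpler
-- what changed: Replaces the binary heap with a once-sorted pool: pop the two front elements and re-insert the merged value at its sorted position, instead of heapify/heappop/heappush.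
import Mathlib
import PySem

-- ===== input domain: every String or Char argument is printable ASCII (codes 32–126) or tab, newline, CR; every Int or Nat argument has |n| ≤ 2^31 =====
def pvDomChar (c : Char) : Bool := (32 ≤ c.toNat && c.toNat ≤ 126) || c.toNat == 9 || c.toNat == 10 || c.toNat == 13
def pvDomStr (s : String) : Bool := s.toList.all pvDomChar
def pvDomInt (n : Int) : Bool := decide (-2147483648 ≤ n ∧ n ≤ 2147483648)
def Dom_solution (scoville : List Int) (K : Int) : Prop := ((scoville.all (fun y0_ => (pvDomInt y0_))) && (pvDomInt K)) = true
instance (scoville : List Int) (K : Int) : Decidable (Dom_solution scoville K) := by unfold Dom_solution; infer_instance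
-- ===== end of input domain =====

-- B replaces A's heap with a sorted pool (sort once, pop the two front elements, re-insert
-- the merged value at its sorted position); objective: simpler. Equivalence is about the
-- RETURN value only: A heapifies its argument in place, B leaves it untouched.

-- ===== PORT A =====
-- heapq is modelled by its observable value contract: heappop returns the multiset minimum and
-- removes one occurrence of it, heappush adds its value; heapify only rearranges. The internal
-- array layout never influences A's returned int, so this hand port is exact on the return value.
-- The while-loop is ported with a fuel parameter; each iteration shrinks the heap by one element,
-- so fuel = initial length always suffices (fuel 0 coincides with the empty-heap exit).
def loopA (K : Int) : Nat → List Int → Int → Int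
  | 0, _, answer => answer
  | fuel + 1, heap, answer =>
    if heap = [] then answer                                       -- while heap:
    else
      let m1 := (PySem.List.min? heap (fun x => x)).getD 0         -- the root heap[0] / heappop value
      if heap.length = 1 ∧ m1 < K then -1                          -- len(heap)==1 and heap[0]<K
      else if K ≤ m1 then answer                                   -- min_value >= K: break
      else
        let h1 := heap.erase m1                                    -- heappop(heap)
        let m2 := (PySem.List.min? h1 (fun x => x)).getD 0         -- min_value2 = heappop(heap)
        loopA K fuel ((h1.erase m2) ++ [m1 + 2 * m2]) (answer + 1) -- heappush; answer += 1

def solution (scoville : List Int) (K : Int) : Int :=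
  loopA K scoville.length scoville 0

-- ===== PORT B =====
-- _ins_sorted(v, lst): copy the ≤ v prefix, place v, copy the rest
def insSorted (v : Int) : List Int → List Int
  | [] => [v]
  | x :: xs => if x ≤ v then x :: insSorted v xs else v :: x :: xs

-- the while-loop over the shrinking pool, again with fuel = initial length
def loopB (K : Int) : Nat → List Int → Int → Int
  | 0, _, answer => answer
  | fuel + 1, pool, answer =>
    match pool with
    | [] => answer                                              -- while pool: exhausted
    | [x] => if K ≤ x then answer else -1                       -- pool[0] >= K / len(pool)==1
    | x :: y :: rest =>
      if K ≤ x then answer                                      -- pool[0] >= K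
      else loopB K fuel (insSorted (x + 2 * y) rest) (answer + 1)

def solution_alt (scoville : List Int) (K : Int) : Int :=
  loopB K (PySem.List.sorted scoville (fun x => x) false).length
    (PySem.List.sorted scoville (fun x => x) false) 0

-- ===== PRECONDITION & SPEC =====
def Spec_solution (scoville : List Int) (K : Int) (out : Int) : Prop := out = solution_alt scoville K
instance (scoville : List Int) (K : Int) (out : Int) : Decidable (Spec_solution scoville K out) := by unfold Spec_solution; infer_instance

-- ===== CLAIM (what is proved, stated in full; the proofs are below) =====
def Claim_equal_solution : Prop := ∀ (scoville : List Int) (K : Int), Dom_solution scoville K → Spec_solution scoville K (solution scoville K)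

-- ===== LEMMAS AND PROOFS =====

theorem min?_id_sorted (x : Int) (t : List Int) (hs : (x :: t).Pairwise (· ≤ ·)) :
    PySem.List.min? (x :: t) (fun z => z) = some x := by
  cases hm : PySem.List.min? (x :: t) (fun z => z) with
  | none =>
    have := (PySem.List.min?_eq_none_iff (x :: t) (fun z : Int => z)).mp hm
    simp at this
  | some m =>
    have hmem : m ∈ x :: t := PySem.List.min?_mem hm
    have hmin : m ≤ x := PySem.List.min?_isMin hm x (by simp)
    have hxle : x ≤ m := by
      rcases List.mem_cons.mp hmem with h | h
      · omega
      · exact List.rel_of_pairwise_cons hs h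
    have : m = x := le_antisymm hmin hxle
    rw [this]

theorem min?_id_perm {h h' : List Int} (hp : h.Perm h') :
    PySem.List.min? h (fun z => z) = PySem.List.min? h' (fun z => z) := by
  cases hm : PySem.List.min? h (fun z => z) with
  | none =>
    have hnil := (PySem.List.min?_eq_none_iff h (fun z : Int => z)).mp hm
    subst hnil
    have h2 : h' = [] := hp.symm.eq_nil
    rw [h2, hm]
  | some m =>
    cases hm' : PySem.List.min? h' (fun z => z) with
    | none =>
      have hnil := (PySem.List.min?_eq_none_iff h' (fun z : Int => z)).mp hm'
      subst hnil
      have h2 : h = [] := hp.eq_nil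
      rw [h2] at hm
      have := (PySem.List.min?_eq_none_iff ([] : List Int) (fun z : Int => z)).mpr rfl
      rw [this] at hm
      exact hm.symm ▸ rfl
    | some m' =>
      have h1 : m ≤ m' := PySem.List.min?_isMin hm m' (hp.mem_iff.mpr (PySem.List.min?_mem hm'))
      have h2 : m' ≤ m := PySem.List.min?_isMin hm' m (hp.mem_iff.mp (PySem.List.min?_mem hm))
      have : m = m' := le_antisymm h1 h2
      rw [this]

theorem loopA_perm : ∀ (n : Nat) (h h' : List Int), h.Perm h' →
    ∀ (K a : Int), loopA K n h a = loopA K n h' a := by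
  intro n
  induction n with
  | zero => intro h h' _ K a; rfl
  | succ n ih =>
    intro h h' hp K a
    by_cases h0 : h = []
    · subst h0
      have h0' : h' = [] := hp.symm.eq_nil
      subst h0'
      rfl
    · have h0' : h' ≠ [] := fun e => h0 ((e ▸ hp).eq_nil)
      have hmin : PySem.List.min? h' (fun z => z) = PySem.List.min? h (fun z => z) :=
        (min?_id_perm hp).symm
      have hlen' : h'.length = h.length := hp.length_eq.symm
      show (if h = [] then a else _) = (if h' = [] then a else _)
      rw [if_neg h0, if_neg h0']
      simp only [hmin, hlen']
      by_cases hc1 : h.length = 1 ∧ (PySem.List.min? h (fun z => z)).getD 0 < K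
      · rw [if_pos hc1, if_pos hc1]
      · rw [if_neg hc1, if_neg hc1]
        by_cases hc2 : K ≤ (PySem.List.min? h (fun z => z)).getD 0
        · rw [if_pos hc2, if_pos hc2]
        · rw [if_neg hc2, if_neg hc2]
          have hpe : (h.erase ((PySem.List.min? h (fun z => z)).getD 0)).Perm
              (h'.erase ((PySem.List.min? h (fun z => z)).getD 0)) := hp.erase _
          have hmin2 : PySem.List.min? (h'.erase ((PySem.List.min? h (fun z => z)).getD 0)) (fun z => z)
              = PySem.List.min? (h.erase ((PySem.List.min? h (fun z => z)).getD 0)) (fun z => z) :=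
            (min?_id_perm hpe).symm
          simp only [hmin2]
          exact ih _ _ ((hpe.erase _).append (List.Perm.refl _)) K (a + 1)

theorem insSorted_length (v : Int) (l : List Int) : (insSorted v l).length = l.length + 1 := by
  induction l with
  | nil => rfl
  | cons x xs ih => by_cases h : x ≤ v <;> simp [insSorted, h, ih]

theorem insSorted_perm (v : Int) (l : List Int) : (insSorted v l).Perm (v :: l) := by
  induction l with
  | nil => simp [insSorted]
  | cons x xs ih =>
    by_cases h : x ≤ v
    · simpa [insSorted, h] using ((ih.cons x).trans (List.Perm.swap v x xs))
    · simp [insSorted, h]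

theorem insSorted_pairwise (v : Int) (l : List Int) (hs : l.Pairwise (· ≤ ·)) :
    (insSorted v l).Pairwise (· ≤ ·) := by
  induction l with
  | nil => simp [insSorted]
  | cons x xs ih =>
    rcases List.pairwise_cons.mp hs with ⟨hx, hxs⟩
    by_cases h : x ≤ v
    · have hmem : ∀ y ∈ insSorted v xs, x ≤ y := by
        intro y hy
        rcases List.mem_cons.mp ((insSorted_perm v xs).mem_iff.mp hy) with hv | hy'
        · exact hv ▸ h
        · exact hx y hy'
      simpa [insSorted, h, List.pairwise_cons] using ⟨hmem, ih hxs⟩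
    · have hv : v ≤ x := le_of_not_ge h
      rw [insSorted, if_neg h]
      refine List.pairwise_cons.mpr ⟨?_, hs⟩
      intro y hy
      rcases List.mem_cons.mp hy with rfl | hy'
      · exact hv
      · exact le_trans hv (hx y hy')

theorem loopB_eq_loopA : ∀ (n : Nat) (pool : List Int), pool.length = n →
    pool.Pairwise (· ≤ ·) → ∀ (K a : Int), loopB K n pool a = loopA K n pool a := by
  intro n
  induction n with
  | zero => intro pool _ _ K a; rfl
  | succ n ih =>
    intro pool hlen hs K a
    match pool with
    | [] => rfl
    | [x] =>
      have hmin : PySem.List.min? [x] (fun z => z) = some x := min?_id_sorted x [] (by simp)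
      show (if K ≤ x then a else -1)
          = (if ([x] : List Int) = [] then a else _)
      rw [if_neg (by simp : ¬([x] : List Int) = [])]
      simp only [hmin, Option.getD_some]
      by_cases hK : K ≤ x
      · rw [if_pos hK, if_neg (by simp; omega : ¬(([x] : List Int).length = 1 ∧ x < K)), if_pos hK]
      · rw [if_neg hK, if_pos (⟨by simp, lt_of_not_ge hK⟩ : ([x] : List Int).length = 1 ∧ x < K)]
    | x :: y :: rest =>
      have hstail : (y :: rest).Pairwise (· ≤ ·) := (List.pairwise_cons.mp hs).2
      have hs2 : rest.Pairwise (· ≤ ·) := (List.pairwise_cons.mp hstail).2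
      have hm1 : PySem.List.min? (x :: y :: rest) (fun z => z) = some x := min?_id_sorted _ _ hs
      have hm2 : PySem.List.min? (y :: rest) (fun z => z) = some y := min?_id_sorted _ _ hstail
      show (if K ≤ x then a else loopB K n (insSorted (x + 2 * y) rest) (a + 1))
          = (if (x :: y :: rest : List Int) = [] then a else _)
      rw [if_neg (by simp : ¬(x :: y :: rest : List Int) = [])]
      simp only [hm1, Option.getD_some]
      rw [if_neg (by simp : ¬((x :: y :: rest : List Int).length = 1 ∧ x < K))]
      by_cases hK : K ≤ x
      · rw [if_pos hK, if_pos hK]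
      · rw [if_neg hK, if_neg hK, List.erase_cons_head]
        simp only [hm2, Option.getD_some]
        rw [List.erase_cons_head]
        have hlb : (insSorted (x + 2 * y) rest).length = n := by
          rw [insSorted_length]
          simp only [List.length_cons] at hlen
          omega
        rw [ih (insSorted (x + 2 * y) rest) hlb (insSorted_pairwise _ _ hs2) K (a + 1)]
        exact loopA_perm n _ _
          ((insSorted_perm _ _).trans (List.perm_append_singleton _ _).symm) K (a + 1)

-- ===== VERDICT (by name: the statement is the Claim_ definition above) =====
theorem solution_spec : Claim_equal_solution := by
  intro scoville K _
  unfold Spec_solution solution solution_alt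
  have hperm : (PySem.List.sorted scoville (fun x => x) false).Perm scoville :=
    PySem.List.sorted_perm scoville (fun x => x) false
  rw [loopB_eq_loopA (PySem.List.sorted scoville (fun x => x) false).length _ rfl
    (PySem.List.sorted_pairwise scoville (fun x => x))]
  rw [hperm.length_eq]
  exact loopA_perm scoville.length scoville _ hperm.symm K 0
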